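-- pv_equiv track=rewrite | github.com/azfar-imtiaz/GrammarChecker | train_svm.py | equalize_class_data
-- ===== SOURCE A (Python) =====
-- def equalize_class_data(sents_tokenized_train, labels_train):
--     class_1_threshold = 3000
--     train_data_eq = []
--     train_labels_eq = []
--
--     class_1_count = 0
--     for sent, label in zip(sents_tokenized_train, labels_train):
--         if label == 0:
--             train_data_eq.append(sent)
--             train_labels_eq.append(label)
--         elif label == 1:
--             if class_1_count <= class_1_threshold:
--                 train_data_eq.append(sent)
--                 train_labels_eq.append(label)
--                 class_1_count += 1
--
--     return train_data_eq, train_labels_eq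
-- ===== SOURCE B (Python) =====
-- def equalize_class_data(sents_tokenized_train, labels_train):
--     # Two passes: build the table of the first 3001 class-1 indices, then filter.
--     ones = [i for i, (_, label) in enumerate(zip(sents_tokenized_train, labels_train))
--             if label == 1]
--     keep = set(ones[:3001])
--     train_data_eq = []
--     train_labels_eq = []
--     for i, (sent, label) in enumerate(zip(sents_tokenized_train, labels_train)):
--         if label == 0 or i in keep:
--             train_data_eq.append(sent)
--             train_labels_eq.append(label)
--     return train_data_eq, train_labels_eq
-- ===== Notes on version B (the rewrite author's own statement) =====
-- stated objective: alternative
-- what changed: Replaces the stateful single-pass counter with a two-pass scheme: first collect the indices of the first 3001 class-1 samples into a set, then filter the enumerated pairs by label==0 or index membership.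
import Mathlib
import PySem

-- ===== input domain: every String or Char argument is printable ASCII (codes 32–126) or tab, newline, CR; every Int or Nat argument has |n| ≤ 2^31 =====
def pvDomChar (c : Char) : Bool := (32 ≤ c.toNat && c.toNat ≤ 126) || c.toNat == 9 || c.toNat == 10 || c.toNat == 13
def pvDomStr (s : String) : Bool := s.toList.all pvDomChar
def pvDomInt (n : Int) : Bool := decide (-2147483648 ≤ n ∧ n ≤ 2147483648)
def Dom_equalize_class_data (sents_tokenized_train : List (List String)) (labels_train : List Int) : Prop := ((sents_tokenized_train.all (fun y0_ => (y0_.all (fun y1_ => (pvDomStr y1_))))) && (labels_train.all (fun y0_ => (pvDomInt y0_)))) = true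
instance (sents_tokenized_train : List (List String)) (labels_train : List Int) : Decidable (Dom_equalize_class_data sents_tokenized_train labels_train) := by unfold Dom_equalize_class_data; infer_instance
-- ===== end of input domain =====

-- B replaces A's stateful single-pass counter by a two-pass scheme (index table of the first
-- 3001 class-1 positions, then a membership filter); alternative decomposition, same cost.

-- ===== PORT A =====
-- single pass over zip(sents, labels) with a class-1 counter, appending to two accumulators
def equalize_class_data (sents_tokenized_train : List (List String)) (labels_train : List Int) : List (List String) × List Int :=
  ((sents_tokenized_train.zip labels_train).foldl
    (fun (st : (List (List String) × List Int) × Int) (p : List String × Int) =>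
      if p.2 = 0 then ((st.1.1 ++ [p.1], st.1.2 ++ [p.2]), st.2)
      else if p.2 = 1 then
        (if st.2 ≤ 3000 then ((st.1.1 ++ [p.1], st.1.2 ++ [p.2]), st.2 + 1) else st)
      else st)
    (([], []), (0 : Int))).1

-- ===== PORT B =====
-- first pass: keep = set(ones[:3001]) where ones = [i for i,(_,lb) in enumerate(zip(...)) if lb==1]
-- (ones[:3001] on a list of Nodup indices = List.take 3001, exact); second pass: filter by
-- label == 0 or i in keep
def equalize_class_data_alt (sents_tokenized_train : List (List String)) (labels_train : List Int) : List (List String) × List Int :=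
  (PySem.List.enumerate (sents_tokenized_train.zip labels_train) 0).foldl
    (fun (st : List (List String) × List Int) (p : Int × (List String × Int)) =>
      if p.2.2 = 0 ∨ p.1 ∈ PySem.Set.ofList
          ((((PySem.List.enumerate (sents_tokenized_train.zip labels_train) 0).filter
              (fun q => q.2.2 = 1)).map (·.1)).take 3001)
      then (st.1 ++ [p.2.1], st.2 ++ [p.2.2]) else st)
    ([], [])

-- ===== PRECONDITION & SPEC =====
def Spec_equalize_class_data (sents_tokenized_train : List (List String)) (labels_train : List Int) (out : List (List String) × List Int) : Prop := out = equalize_class_data_alt sents_tokenized_train labels_train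
instance (sents_tokenized_train : List (List String)) (labels_train : List Int) (out : List (List String) × List Int) : Decidable (Spec_equalize_class_data sents_tokenized_train labels_train out) := by unfold Spec_equalize_class_data; infer_instance

-- ===== CLAIM (what is proved, stated in full; the proofs are below) =====
def Claim_equal_equalize_class_data : Prop := ∀ (sents_tokenized_train : List (List String)) (labels_train : List Int), Dom_equalize_class_data sents_tokenized_train labels_train → Spec_equalize_class_data sents_tokenized_train labels_train (equalize_class_data sents_tokenized_train labels_train)

-- ===== LEMMAS AND PROOFS =====

-- common reference: the selected (sent, label) pairs, built front-to-back with counter c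
def refEq : List (List String × Int) → Int → List (List String) × List Int
  | [], _ => ([], [])
  | p :: rest, c =>
    if p.2 = 0 then (p.1 :: (refEq rest c).1, p.2 :: (refEq rest c).2)
    else if p.2 = 1 then
      (if c ≤ 3000 then (p.1 :: (refEq rest (c+1)).1, p.2 :: (refEq rest (c+1)).2)
       else refEq rest c)
    else refEq rest c

-- indices (from n) carrying label 1
def onesIdx : List (List String × Int) → Int → List Int
  | [], _ => []
  | p :: rest, n => if p.2 = 1 then n :: onesIdx rest (n+1) else onesIdx rest (n+1)

lemma A_fold (xs : List (List String × Int)) :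
    ∀ (d : List (List String)) (l : List Int) (c : Int),
    (xs.foldl
      (fun (st : (List (List String) × List Int) × Int) (p : List String × Int) =>
        if p.2 = 0 then ((st.1.1 ++ [p.1], st.1.2 ++ [p.2]), st.2)
        else if p.2 = 1 then
          (if st.2 ≤ 3000 then ((st.1.1 ++ [p.1], st.1.2 ++ [p.2]), st.2 + 1) else st)
        else st)
      ((d, l), c)).1 = (d ++ (refEq xs c).1, l ++ (refEq xs c).2) := by
  induction xs with
  | nil => intro d l c; simp [refEq]
  | cons p rest ih =>
    intro d l c
    by_cases h0 : p.2 = 0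
    · rw [List.foldl_cons, if_pos h0, ih]
      simp [refEq, h0]
    · by_cases h1 : p.2 = 1
      · by_cases hc : c ≤ 3000
        · rw [List.foldl_cons, if_neg h0, if_pos h1, if_pos hc, ih]
          simp [refEq, h1, hc]
        · rw [List.foldl_cons, if_neg h0, if_pos h1, if_neg hc, ih]
          simp [refEq, h1, hc]
      · rw [List.foldl_cons, if_neg h0, if_neg h1, ih]
        simp [refEq, h0, h1]

lemma ones_eq (xs : List (List String × Int)) :
    ∀ n : Int, ((PySem.List.enumerate xs n).filter (fun q => decide (q.2.2 = 1))).map (·.1) = onesIdx xs n := by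
  induction xs with
  | nil => intro n; simp [PySem.List.enumerate_nil, onesIdx]
  | cons p rest ih =>
    intro n
    by_cases h1 : p.2 = 1 <;>
      simp [PySem.List.enumerate_cons, h1, onesIdx, ih]

lemma onesIdx_ge (xs : List (List String × Int)) :
    ∀ (n m : Int), m ∈ onesIdx xs n → n ≤ m := by
  induction xs with
  | nil => intro n m h; simp [onesIdx] at h
  | cons p rest ih =>
    intro n m h
    by_cases h1 : p.2 = 1 <;> simp [onesIdx, h1] at h
    · rcases h with h | h
      · omega
      · have := ih (n+1) m h; omega
    · have := ih (n+1) m h; omega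

lemma mem_take_append (pref : List Int) (n : Int) (rest : List Int) (k : Nat)
    (h : ∀ m ∈ pref, m < n) :
    n ∈ List.take k (pref ++ n :: rest) ↔ pref.length < k := by
  constructor
  · intro hm
    by_contra hk
    push Not at hk
    rw [List.take_append_of_le_length hk] at hm
    have := h n (List.mem_of_mem_take hm)
    omega
  · intro hk
    rw [List.take_append]
    have h1 : pref.take k = pref := List.take_of_length_le (by omega)
    rw [h1]
    refine List.mem_append_right _ ?_
    cases hkk : k - pref.length with
    | zero => omega
    | succ j => simp [List.take_succ_cons]

lemma not_mem_take_all_ne (l : List Int) (n : Int) (k : Nat)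
    (h : ∀ m ∈ l, m ≠ n) : n ∉ List.take k l := by
  intro hm
  exact h n (List.mem_of_mem_take hm) rfl

lemma B_fold (xs : List (List String × Int)) :
    ∀ (n c : Int) (pref : List Int) (d : List (List String)) (l : List Int),
    (∀ m ∈ pref, m < n) →
    ((pref.length : Int) = c ∨ (3000 < (pref.length : Int) ∧ 3000 < c)) →
    ((PySem.List.enumerate xs n).foldl
      (fun (st : List (List String) × List Int) (p : Int × (List String × Int)) =>
        if p.2.2 = 0 ∨ p.1 ∈ PySem.Set.ofList (List.take 3001 (pref ++ onesIdx xs n))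
        then (st.1 ++ [p.2.1], st.2 ++ [p.2.2]) else st)
      (d, l))
    = (d ++ (refEq xs c).1, l ++ (refEq xs c).2) := by
  induction xs with
  | nil => intro n c pref d l _ _; simp [PySem.List.enumerate_nil, refEq]
  | cons p rest ih =>
    intro n c pref d l hlt hinv
    rw [PySem.List.enumerate_cons]
    by_cases h1 : p.2 = 1
    · -- label 1: kept iff n ∈ take 3001 (pref ++ n :: onesIdx rest (n+1)), iff pref.length ≤ 3000
      have hidx : onesIdx (p :: rest) n = n :: onesIdx rest (n+1) := by simp [onesIdx, h1]
      have hmem : n ∈ List.take 3001 (pref ++ n :: onesIdx rest (n+1)) ↔ pref.length < 3001 :=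
        mem_take_append pref n _ 3001 hlt
      have hassoc : pref ++ n :: onesIdx rest (n+1) = (pref ++ [n]) ++ onesIdx rest (n+1) := by
        simp
      have hlt' : ∀ m ∈ pref ++ [n], m < n + 1 := by
        intro m hm; rcases List.mem_append.1 hm with hm | hm
        · have := hlt m hm; omega
        · simp at hm; omega
      have h0 : ¬ (p.2 = 0) := by omega
      by_cases hc : c ≤ 3000
      · -- counter small: pref.length ≤ 3000 by the invariant, so n is in keep
        have hplen : (pref.length : Int) = c := by
          rcases hinv with h | h
          · exact h
          · omega
        have hkeep : n ∈ List.take 3001 (pref ++ n :: onesIdx rest (n+1)) := by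
          rw [hmem]; omega
        rw [List.foldl_cons, hidx,
          if_pos (Or.inr (by rw [PySem.Set.mem_ofList]; exact hkeep)), hassoc,
          ih (n+1) (c+1) (pref ++ [n]) (d ++ [p.1]) (l ++ [p.2]) hlt'
            (by left; simp [List.length_append]; omega)]
        simp [refEq, h1, hc]
      · -- counter large: pref.length > 3000, n not in keep
        have hplen : 3000 < (pref.length : Int) := by
          rcases hinv with h | h
          · omega
          · exact h.1
        have hkeep : n ∉ List.take 3001 (pref ++ n :: onesIdx rest (n+1)) := by
          rw [hmem]; omega
        rw [List.foldl_cons, hidx,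
          if_neg (by rw [PySem.Set.mem_ofList]; exact fun h => h.elim h0 hkeep), hassoc,
          ih (n+1) c (pref ++ [n]) d l hlt'
            (by right; refine ⟨by simp [List.length_append]; omega, by omega⟩)]
        simp [refEq, h1, hc]
    · -- label ≠ 1: keep set unchanged, ones of tail start at n+1
      have hidx : onesIdx (p :: rest) n = onesIdx rest (n+1) := by simp [onesIdx, h1]
      have hnot : n ∉ List.take 3001 (pref ++ onesIdx rest (n+1)) := by
        apply not_mem_take_all_ne
        intro m hm
        rcases List.mem_append.1 hm with hm | hm
        · have := hlt m hm; omega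
        · have := onesIdx_ge rest (n+1) m hm; omega
      have hlt' : ∀ m ∈ pref, m < n + 1 := by intro m hm; have := hlt m hm; omega
      by_cases h0 : p.2 = 0
      · rw [List.foldl_cons, hidx, if_pos (Or.inl h0),
          ih (n+1) c pref (d ++ [p.1]) (l ++ [p.2]) hlt' hinv]
        simp [refEq, h0]
      · rw [List.foldl_cons, hidx,
          if_neg (by rw [PySem.Set.mem_ofList]; exact fun h => h.elim h0 hnot),
          ih (n+1) c pref d l hlt' hinv]
        simp [refEq, h0, h1]

-- ===== VERDICT (by name: the statement is the Claim_ definition above) =====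
theorem equalize_class_data_spec : Claim_equal_equalize_class_data := by
  intro s l _
  unfold Spec_equalize_class_data equalize_class_data equalize_class_data_alt
  rw [A_fold, ones_eq, ← List.nil_append (onesIdx (s.zip l) 0),
    B_fold (s.zip l) 0 0 [] [] [] (by simp) (by left; simp)]
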